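-- pv_equiv track=rewrite | github.com/pasttheboundaries/ptbutil | iteration/listwise.py | sequence_binary_mask
-- ===== SOURCE A (Python) =====
-- def sequence_binary_mask(sequence, binary_mask: int = 0):
--     """returns a generator of elements from sequence masked with a binary number.
--     Binary mask is read from right, but sequence  is read from left.
--     sequence = 'abcde' and mask = 0b1101 will return (a,c,d).
--     :param binary_mask: can be any positive integer"""
--     ind = 0
--     l = len(sequence)
--     while ind < l:
--         if binary_mask >> ind & 1:
--             yield sequence[ind]
--         else:
--             pass
--         ind += 1
-- ===== SOURCE B (Python) =====
-- def sequence_binary_mask(sequence, binary_mask: int = 0):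
--     """Staged pipeline: reduce the mask modulo 2**len(sequence), render it as a
--     binary string, reverse it so digit i aligns with sequence[i], then zip with
--     the sequence and keep the elements whose digit is '1'."""
--     t = binary_mask % (1 << len(sequence))
--     bits = bin(t)[2:][::-1]
--     return (elem for elem, bit in zip(sequence, bits) if bit == '1')
-- ===== Notes on version B (the rewrite author's own statement) =====
-- stated objective: faster
-- what changed: A loops over sequence indices in Python testing binary_mask >> ind & 1 one index at a time; B has no element loop at all: it reduces the mask modulo 2**len(sequence), renders it once as a binary string, reverses it, and zip-filters it against the sequence.
import Mathlib
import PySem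

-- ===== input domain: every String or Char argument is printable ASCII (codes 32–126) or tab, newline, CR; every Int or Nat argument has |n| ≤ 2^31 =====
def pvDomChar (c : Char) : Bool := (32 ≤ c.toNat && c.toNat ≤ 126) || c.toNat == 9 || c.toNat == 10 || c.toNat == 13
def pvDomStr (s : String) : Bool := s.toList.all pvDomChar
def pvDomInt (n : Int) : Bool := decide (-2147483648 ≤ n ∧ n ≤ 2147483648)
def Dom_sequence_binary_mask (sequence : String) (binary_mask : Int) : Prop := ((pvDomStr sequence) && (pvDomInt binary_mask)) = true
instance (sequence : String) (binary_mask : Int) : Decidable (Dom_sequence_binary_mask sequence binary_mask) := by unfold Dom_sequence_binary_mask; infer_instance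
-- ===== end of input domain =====

-- B replaces A's index loop (binary_mask >> ind & 1 per index) by a staged pipeline with no
-- element loop: mask mod 2^len, one bin() rendering, reverse, zip-filter (objective: faster, measured).
-- Both Pythons are generators; equivalence is about the produced element list.

-- ===== PORT A =====
-- while ind < l: if binary_mask >> ind & 1: yield sequence[ind]; ind += 1
-- (ind < l, so pyGet? is always `some`; Python's sequence[ind] is a 1-char str, hence String.ofList [c])
def pvGoA (sequence : String) (binary_mask : Int) (l : Nat) (ind : Nat) : List String :=
  if _h : ind < l then
    (if PySem.Int.band (binary_mask >>> ind) 1 ≠ 0 then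
       [((PySem.Str.pyGet? sequence (ind : Int)).map (fun c => String.ofList [c])).getD ""]
     else [])
    ++ pvGoA sequence binary_mask l (ind + 1)
  else []
termination_by l - ind

def sequence_binary_mask (sequence : String) (binary_mask : Int) : List String :=
  pvGoA sequence binary_mask sequence.toList.length 0   -- l = len(sequence), ind = 0

-- ===== PORT B =====
-- t = binary_mask % (1 << len(sequence)); bits = bin(t)[2:][::-1];
-- (elem for elem, bit in zip(sequence, bits) if bit == '1')
-- bin(t) is PySem.Int.toBinChars0b; s[2:] is drop 2 (PySem.List.slice_from_natCast);
-- s[::-1] is reverse (PySem.List.slice?_none_none_neg_one); zip/filter are List.zip/filter.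
def sequence_binary_mask_alt (sequence : String) (binary_mask : Int) : List String :=
  let cs := sequence.toList
  let t := PySem.Int.mod binary_mask ((1 : Int) <<< cs.length)
  let bits := ((PySem.Int.toBinChars0b t).drop 2).reverse
  ((cs.zip bits).filter (fun p => p.2 == '1')).map (fun p => String.ofList [p.1])

-- ===== PRECONDITION & SPEC =====
def Spec_sequence_binary_mask (sequence : String) (binary_mask : Int) (out : List String) : Prop := out = sequence_binary_mask_alt sequence binary_mask
instance (sequence : String) (binary_mask : Int) (out : List String) : Decidable (Spec_sequence_binary_mask sequence binary_mask out) := by unfold Spec_sequence_binary_mask; infer_instance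

-- ===== CLAIM (what is proved, stated in full; the proofs are below) =====
def Claim_equal_sequence_binary_mask : Prop := ∀ (sequence : String) (binary_mask : Int), Dom_sequence_binary_mask sequence binary_mask → Spec_sequence_binary_mask sequence binary_mask (sequence_binary_mask sequence binary_mask)

-- ===== LEMMAS AND PROOFS =====

-- Proof-side reference chain: a per-character halving recursion pvHalve links the two ports.
def pvHalve (chars : List Char) (m : Int) : List String :=
  match chars with
  | [] => []
  | c :: rest =>
    if m = 0 then []
    else (if PySem.Int.mod m 2 ≠ 0 then [String.ofList [c]] else [])
         ++ pvHalve rest (PySem.Int.floordiv m 2)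

-- LSB-first binary digit characters of n (empty for 0); (Nat.toDigits 2 n).reverse for n > 0.
def pvBitsRev (n : Nat) : List Char :=
  if n = 0 then [] else Nat.digitChar (n % 2) :: pvBitsRev (n / 2)

lemma pvBitsRev_zero : pvBitsRev 0 = [] := by rw [pvBitsRev]; simp

lemma pvBitsRev_one : pvBitsRev 1 = ['1'] := by
  rw [pvBitsRev]
  norm_num [pvBitsRev_zero]
  rfl

lemma pvHalve_zero (cs : List Char) : pvHalve cs 0 = [] := by
  cases cs <;> simp [pvHalve]

lemma pvShift_succ (m : Int) (k : Nat) :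
    m >>> (k + 1) = PySem.Int.floordiv (m >>> k) 2 := by
  simp [pysem, Int.shiftRight_eq_div_pow, pow_succ]
  exact (Int.ediv_ediv_of_nonneg (by positivity)).symm

lemma pvGoA_eq (cs : List Char) : ∀ (s : String) (pre : List Char) (m : Int),
    s.toList = pre ++ cs →
    pvGoA s m s.toList.length pre.length = pvHalve cs (m >>> pre.length) := by
  induction cs with
  | nil =>
    intro s pre m h
    unfold pvGoA
    simp [h, pvHalve]
  | cons c rest ih =>
    intro s pre m h
    have hlen : s.toList.length = pre.length + (rest.length + 1) := by simp [h]
    have hlt : pre.length < s.toList.length := by omega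
    have hget : PySem.Str.pyGet? s (pre.length : Int) = some c := by
      rw [PySem.Str.pyGet?_natCast, h]
      simp
    have hrec : pvGoA s m s.toList.length (pre.length + 1)
        = pvHalve rest (m >>> (pre.length + 1)) := by
      have := ih s (pre ++ [c]) m (by simp [h])
      simpa using this
    unfold pvGoA
    rw [dif_pos hlt, hget, hrec, pvShift_succ]
    rw [PySem.Int.band_one]
    by_cases hz : m >>> pre.length = 0
    · simp [pvHalve, hz, pvHalve_zero, PySem.Int.mod]
    · simp [pvHalve, hz]

-- only the low `cs.length` bits of m matter to pvHalve
lemma pvHalve_emod (cs : List Char) : ∀ (m : Int),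
    pvHalve cs m = pvHalve cs (m % (2 ^ cs.length)) := by
  induction cs with
  | nil => intro m; simp [pvHalve]
  | cons c rest ih =>
    intro m
    have hP : (0:Int) < 2 ^ rest.length := by positivity
    have hM : (0:Int) < 2 ^ (rest.length + 1) := by positivity
    simp only [List.length_cons]
    set r := m % (2 ^ (rest.length + 1)) with hr
    obtain ⟨q, hq⟩ : ∃ q : Int, m = r + q * (2 ^ (rest.length + 1)) := by
      refine ⟨m / 2 ^ (rest.length + 1), ?_⟩
      rw [hr, Int.emod_def]; ring
    have hmod2 : PySem.Int.mod m 2 = PySem.Int.mod r 2 := by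
      rw [PySem.Int.mod_eq_emod_of_pos (by omega), PySem.Int.mod_eq_emod_of_pos (by omega)]
      rw [hq, pow_succ]
      rw [show r + q * (2 ^ rest.length * 2) = r + q * 2 ^ rest.length * 2 by ring]
      exact Int.add_mul_emod_self_right r _ 2
    have hdiv2 : PySem.Int.floordiv m 2 = PySem.Int.floordiv r 2 + q * 2 ^ rest.length := by
      rw [PySem.Int.floordiv_eq_ediv_of_pos (by omega), PySem.Int.floordiv_eq_ediv_of_pos (by omega)]
      rw [hq, pow_succ]
      rw [show r + q * (2 ^ rest.length * 2) = r + q * 2 ^ rest.length * 2 by ring]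
      exact Int.add_mul_ediv_right r _ (by omega)
    have hdivmod : (PySem.Int.floordiv m 2) % (2 ^ rest.length)
        = (PySem.Int.floordiv r 2) % (2 ^ rest.length) := by
      rw [hdiv2]; exact Int.add_mul_emod_self_right _ q _
    by_cases hm : m = 0
    · have hr0 : r = 0 := by rw [hr, hm]; simp
      rw [hm, hr0]
    · by_cases hrz : r = 0
      · -- m ≠ 0 but its low bits are all zero: no yield at this step, and the tail recursion dies
        have hm2 : PySem.Int.mod m 2 = 0 := by rw [hmod2, hrz]; decide
        have hdvd : (2:Int) ∣ m := (PySem.Int.mod_eq_zero_iff_dvd m 2).mp hm2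
        have htail : (PySem.Int.floordiv m 2) % (2 ^ rest.length) = 0 := by
          rw [hdivmod, hrz, show PySem.Int.floordiv 0 2 = 0 from by decide]
          simp
        calc pvHalve (c :: rest) m
            = pvHalve rest (PySem.Int.floordiv m 2) := by
              simp [pvHalve, hm, hdvd]
          _ = pvHalve rest ((PySem.Int.floordiv m 2) % (2 ^ rest.length)) := ih _
          _ = [] := by rw [htail]; exact pvHalve_zero rest
          _ = pvHalve (c :: rest) r := by rw [hrz]; simp [pvHalve]
      · have htails : pvHalve rest (PySem.Int.floordiv m 2) = pvHalve rest (PySem.Int.floordiv r 2) := by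
          rw [ih (PySem.Int.floordiv m 2), hdivmod, ← ih (PySem.Int.floordiv r 2)]
        simp only [pvHalve, if_neg hm, if_neg hrz, hmod2, htails]

-- zip-filter against the LSB-first digits is the halving recursion
lemma pvZip_eq_pvHalve (cs : List Char) : ∀ (n : Nat),
    ((cs.zip (pvBitsRev n)).filter (fun p => p.2 == '1')).map (fun p => String.ofList [p.1])
      = pvHalve cs (n : Int) := by
  induction cs with
  | nil => intro n; simp [pvHalve]
  | cons c rest ih =>
    intro n
    by_cases hn : n = 0
    · simp [hn, pvBitsRev, pvHalve]
    · rw [pvBitsRev, if_neg hn]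
      rcases Nat.mod_two_eq_zero_or_one n with h2 | h2
      · have hdvd : (2:Int) ∣ (n : Int) := by omega
        simp [pvHalve, hn, h2, hdvd, ih (n / 2), show Nat.digitChar 0 = '0' from rfl]
      · have hodd : ¬ (2:Int) ∣ (n : Int) := by omega
        simp [pvHalve, hn, h2, hodd, ih (n / 2), show Nat.digitChar 1 = '1' from rfl]

-- Nat.toDigits 2, reversed, is pvBitsRev (for n > 0; bin(0) gives "0")
lemma pvToDigitsCore_eq (f : Nat) : ∀ (n : Nat) (l : List Char), 0 < n → n ≤ f →
    Nat.toDigitsCore 2 (f + 1) n l = (pvBitsRev n).reverse ++ l := by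
  induction f with
  | zero => intro n l h1 h2; omega
  | succ f ih =>
    intro n l h1 h2
    rw [Nat.toDigitsCore]
    by_cases hd : n / 2 = 0
    · have hn1 : n = 1 := by omega
      subst hn1
      rw [if_pos hd, pvBitsRev_one]
      rfl
    · rw [if_neg hd, ih (n / 2) _ (by omega) (by omega)]
      rw [show pvBitsRev n = Nat.digitChar (n % 2) :: pvBitsRev (n / 2) from by
        rw [pvBitsRev, if_neg (by omega)]]
      simp

lemma pvToDigits_reverse (n : Nat) (h : 0 < n) :
    (Nat.toDigits 2 n).reverse = pvBitsRev n := by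
  rw [Nat.toDigits, pvToDigitsCore_eq n n [] h (le_refl n)]
  simp

-- zipping with the single digit of bin(0) = "0" filters everything out
lemma pvZip_zero (cs : List Char) :
    ((cs.zip ['0']).filter (fun p => p.2 == '1')).map (fun p => String.ofList [p.1]) = [] := by
  cases cs <;> simp

lemma pvOne_shiftLeft (k : Nat) : ((1 : Int) <<< k) = 2 ^ k := by
  have := Int.shiftLeft_eq (1 : Int) k
  simpa using this

-- ===== VERDICT (by name: the statement is the Claim_ definition above) =====
theorem sequence_binary_mask_spec : Claim_equal_sequence_binary_mask := by
  intro sequence binary_mask _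
  unfold Spec_sequence_binary_mask sequence_binary_mask sequence_binary_mask_alt
  simp only []
  set cs := sequence.toList with hcs
  have hP : (0:Int) < 2 ^ cs.length := by positivity
  set t := PySem.Int.mod binary_mask ((1 : Int) <<< cs.length) with ht
  have htval : t = binary_mask % (2 ^ cs.length) := by
    rw [ht, pvOne_shiftLeft]
    exact PySem.Int.mod_eq_emod_of_pos hP
  have htnn : 0 ≤ t := by
    rw [htval]; exact Int.emod_nonneg _ (by omega)
  have hA : pvGoA sequence binary_mask cs.length 0 = pvHalve cs binary_mask := by
    have := pvGoA_eq cs sequence [] binary_mask (by simp [hcs])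
    simpa [hcs] using this
  have hcast : ((t.toNat : Nat) : Int) = t := Int.toNat_of_nonneg htnn
  have hchain : pvHalve cs binary_mask = pvHalve cs ((t.toNat : Nat) : Int) := by
    rw [hcast, htval]
    exact pvHalve_emod cs binary_mask
  rw [hA, hchain, ← pvZip_eq_pvHalve cs t.toNat]
  by_cases hz : t.toNat = 0
  · have ht0 : t = 0 := by omega
    rw [hz, ht0]
    have : ((PySem.Int.toBinChars0b 0).drop 2).reverse = ['0'] := by decide
    rw [this, pvZip_zero]
    simp [pvBitsRev]
  · have hdig : (PySem.Int.toBinChars0b t).drop 2 = Nat.toDigits 2 t.toNat := by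
      rw [PySem.Int.toBinChars0b, if_neg (by omega)]
      rfl
    rw [hdig, pvToDigits_reverse t.toNat (by omega)]
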